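-- pv_equiv track=rewrite | github.com/irfaan-352/card_game | carda.py | reward_points
-- ===== SOURCE A (Python) =====
-- def reward_points(cards):
--     rew_points = []
--     card_color = [color[0] for color in cards]
--     card_type = [c_type[1] for c_type in cards]
--     card_num = [num[2] for num in cards]
--     num_pts = [rew_points.append(5) for pts in card_num if pts > 10]
--     color_pts = [rew_points.append(2) if col == "red" else rew_points.append(1) for col in card_color]
--     for c_type in card_type:
--         if c_type == "hearts":
--             rew_points.append(5)
--         elif c_type == "diamond":
--             rew_points.append(3)
--         elif c_type == "club":
--             rew_points.append(2)
--         elif c_type == "spades":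
--             rew_points.append(1)
--     rew_points = sum(rew_points)
--     return rew_points
-- ===== SOURCE B (Python) =====
-- def reward_points(cards):
--     total = 0
--     for card in cards:
--         if card[2] > 10:
--             total += 5
--         total += 2 if card[0] == "red" else 1
--         if card[1] == "hearts":
--             total += 5
--         elif card[1] == "diamond":
--             total += 3
--         elif card[1] == "club":
--             total += 2
--         elif card[1] == "spades":
--             total += 1
--     return total
-- ===== Notes on version B (the rewrite author's own statement) =====
-- stated objective: simpler
-- what changed: Replaced A's three separate projection lists, two side-effecting comprehensions that append into a shared points list, and a final sum with a single loop over cards accumulating an integer total directly.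
import Mathlib
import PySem

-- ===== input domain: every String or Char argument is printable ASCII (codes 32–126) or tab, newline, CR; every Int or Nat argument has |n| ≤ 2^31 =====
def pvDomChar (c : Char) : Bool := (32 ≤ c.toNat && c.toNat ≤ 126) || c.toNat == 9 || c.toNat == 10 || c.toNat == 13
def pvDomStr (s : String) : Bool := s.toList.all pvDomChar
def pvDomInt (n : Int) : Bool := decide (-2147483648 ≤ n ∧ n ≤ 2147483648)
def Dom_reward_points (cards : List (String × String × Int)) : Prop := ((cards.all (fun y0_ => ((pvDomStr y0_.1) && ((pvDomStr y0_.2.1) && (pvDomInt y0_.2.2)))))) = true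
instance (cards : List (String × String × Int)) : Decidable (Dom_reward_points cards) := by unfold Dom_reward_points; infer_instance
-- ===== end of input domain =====

-- B replaces A's three projection lists, side-effecting comprehensions and final sum
-- with one accumulator loop over the cards (objective: simpler).


-- ===== PORT A =====
-- literal transliteration: build the projection lists, append the point entries
-- in A's order (num points, then color points, then type points), then sum.
def reward_points (cards : List (String × String × Int)) : Int :=
  let card_color := cards.map (fun color => color.1)
  let card_type := cards.map (fun c_type => c_type.2.1)
  let card_num := cards.map (fun num => num.2.2)
  let rew1 : List Int :=
    card_num.foldl (fun acc pts => if pts > 10 then acc ++ [5] else acc) []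
  let rew2 : List Int :=
    card_color.foldl (fun acc col => if col == "red" then acc ++ [2] else acc ++ [1]) rew1
  let rew3 : List Int :=
    card_type.foldl (fun acc t =>
      if t == "hearts" then acc ++ [5]
      else if t == "diamond" then acc ++ [3]
      else if t == "club" then acc ++ [2]
      else if t == "spades" then acc ++ [1]
      else acc) rew2
  rew3.sum

-- ===== PORT B =====
def reward_points_alt (cards : List (String × String × Int)) : Int :=
  cards.foldl (fun total card =>
    let total := if card.2.2 > 10 then total + 5 else total
    let total := total + (if card.1 == "red" then 2 else 1)
    if card.2.1 == "hearts" then total + 5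
    else if card.2.1 == "diamond" then total + 3
    else if card.2.1 == "club" then total + 2
    else if card.2.1 == "spades" then total + 1
    else total) 0

-- ===== PRECONDITION & SPEC =====
def Spec_reward_points (cards : List (String × String × Int)) (out : Int) : Prop := out = reward_points_alt cards
instance (cards : List (String × String × Int)) (out : Int) : Decidable (Spec_reward_points cards out) := by unfold Spec_reward_points; infer_instance

-- ===== CLAIM (what is proved, stated in full; the proofs are below) =====
def Claim_equal_reward_points : Prop := ∀ (cards : List (String × String × Int)), Dom_reward_points cards → Spec_reward_points cards (reward_points cards)

-- ===== LEMMAS AND PROOFS =====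

-- per-card point functions
def pvNumPts (n : Int) : Int := if n > 10 then 5 else 0
def pvColorPts (s : String) : Int := if s == "red" then 2 else 1
def pvTypePts (s : String) : Int :=
  if s == "hearts" then 5 else if s == "diamond" then 3
  else if s == "club" then 2 else if s == "spades" then 1 else 0

lemma sum_fold_num (l : List Int) (init : List Int) :
    (l.foldl (fun acc pts => if pts > 10 then acc ++ [5] else acc) init).sum
      = init.sum + (l.map pvNumPts).sum := by
  induction l generalizing init with
  | nil => simp
  | cons x xs ih =>
    simp only [List.foldl_cons, List.map_cons, List.sum_cons, pvNumPts]
    split_ifs with h <;> rw [ih] <;> simp <;> ring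

lemma sum_fold_color (l : List String) (init : List Int) :
    (l.foldl (fun acc col => if col == "red" then acc ++ [2] else acc ++ [1]) init).sum
      = init.sum + (l.map pvColorPts).sum := by
  induction l generalizing init with
  | nil => simp
  | cons x xs ih =>
    simp only [List.foldl_cons, List.map_cons, List.sum_cons, pvColorPts]
    split_ifs with h <;> rw [ih] <;> simp <;> ring

lemma sum_fold_type (l : List String) (init : List Int) :
    (l.foldl (fun acc t =>
      if t == "hearts" then acc ++ [5]
      else if t == "diamond" then acc ++ [3]
      else if t == "club" then acc ++ [2]
      else if t == "spades" then acc ++ [1]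
      else acc) init).sum
      = init.sum + (l.map pvTypePts).sum := by
  induction l generalizing init with
  | nil => simp
  | cons x xs ih =>
    simp only [List.foldl_cons, List.map_cons, List.sum_cons, pvTypePts]
    split_ifs with h1 h2 h3 h4 <;> rw [ih] <;> simp <;> ring

lemma alt_fold (cards : List (String × String × Int)) (init : Int) :
    cards.foldl (fun total card =>
      let total := if card.2.2 > 10 then total + 5 else total
      let total := total + (if card.1 == "red" then 2 else 1)
      if card.2.1 == "hearts" then total + 5
      else if card.2.1 == "diamond" then total + 3
      else if card.2.1 == "club" then total + 2
      else if card.2.1 == "spades" then total + 1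
      else total) init
      = init + (cards.map (fun c => pvNumPts c.2.2 + pvColorPts c.1 + pvTypePts c.2.1)).sum := by
  induction cards generalizing init with
  | nil => simp
  | cons x xs ih =>
    simp only [List.foldl_cons, List.map_cons, List.sum_cons]
    rw [ih]
    simp only [pvNumPts, pvColorPts, pvTypePts]
    split_ifs <;> ring

-- ===== VERDICT (by name: the statement is the Claim_ definition above) =====
theorem reward_points_spec : Claim_equal_reward_points := by
  intro cards _
  unfold Spec_reward_points reward_points reward_points_alt
  rw [alt_fold, sum_fold_type, sum_fold_color, sum_fold_num]
  simp only [List.map_map, List.sum_nil, zero_add]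
  rw [← List.sum_map_add, ← List.sum_map_add]
  congr 1
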